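-- pv_equiv track=rewrite | github.com/Nastyaperson123/2022-2-level-labs | lab_2_keywords_cooccurrence/main.py | extract_phrases
-- ===== SOURCE A (Python) =====
-- from string import punctuation
-- from typing import Optional, Sequence, Mapping
--
-- def extract_phrases(text: str) -> Optional[Sequence[str]]:
--     """
--     Splits the text into separate phrases using phrase delimiters
--     :param text: an original text
--     :return: a list of phrases
--
--     In case of corrupt input arguments, None is returned
--     """
--     if not isinstance(text, str) or not text:
--         return None
--
--     for i in text:
--         if i in punctuation + '.;:¡!¿?…⋯‹›«»\\"“”[]()⟨⟩}{&|-–~—':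
--             text = text.replace(i, ',')
--     list_split = text.split(',')
--     return [token.strip() for token in list_split if token.strip()]
-- ===== SOURCE B (Python) =====
-- from string import punctuation
--
--
-- def extract_phrases(text):
--     """Single-pass split into phrases on punctuation delimiters."""
--     if not isinstance(text, str) or not text:
--         return None
--     delimiters = set(punctuation + '.;:¡!¿?…⋯‹›«»\\"“”[]()⟨⟩}{&|-–~—')
--     phrases = []
--     buf = []
--     for ch in text:
--         if ch in delimiters:
--             phrase = ''.join(buf).strip()
--             if phrase:
--                 phrases.append(phrase)
--             buf = []
--         else:
--             buf.append(ch)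
--     phrase = ''.join(buf).strip()
--     if phrase:
--         phrases.append(phrase)
--     return phrases
-- ===== Notes on version B (the rewrite author's own statement) =====
-- stated objective: alternative
-- what changed: Replaces A's per-character whole-string replace passes plus split plus strip/filter passes by one linear scan with a set of delimiters and a phrase buffer that is flushed (stripped, appended if non-empty) at each delimiter and at the end.
import Mathlib
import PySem

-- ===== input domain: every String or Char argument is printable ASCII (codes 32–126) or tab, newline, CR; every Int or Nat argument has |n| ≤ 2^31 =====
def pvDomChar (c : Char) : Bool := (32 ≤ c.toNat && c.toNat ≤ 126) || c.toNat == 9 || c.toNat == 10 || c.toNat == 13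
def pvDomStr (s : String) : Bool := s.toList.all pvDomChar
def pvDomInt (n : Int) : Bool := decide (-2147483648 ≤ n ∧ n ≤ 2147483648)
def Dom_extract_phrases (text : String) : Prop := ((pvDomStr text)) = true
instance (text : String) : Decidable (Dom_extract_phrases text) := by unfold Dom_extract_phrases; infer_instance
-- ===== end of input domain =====

-- B replaces A's per-character whole-string replace passes (plus split and strip/filter passes)
-- by one linear scan with a delimiter set and a phrase buffer flushed at delimiters and at the end.
-- string.punctuation + the extra delimiter characters of A
def pvDelimChars : List Char :=
  ("!\"#$%&'()*+,-./:;<=>?@[\\]^_`{|}~" ++ ".;:¡!¿?…⋯‹›«»\\\"“”[]()⟨⟩}{&|-–~—").toList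

-- ===== PORT A =====
def extract_phrases (text : String) : Option (List String) :=
  if text = "" then none
  else
    -- `for i in text` iterates the ORIGINAL string while `text` is rebound by replace
    let t := text.toList.foldl
      (fun acc i => if pvDelimChars.contains i then PySem.Chars.replace acc [i] [','] else acc)
      text.toList
    let list_split := PySem.Chars.splitOn t [',']
    some ((list_split.map (fun tok => String.ofList (PySem.Chars.strip tok))).filter (fun tok => tok ≠ ""))

-- ===== PORT B =====
def pvDelimSet : PySem.Set Char := PySem.Set.ofList pvDelimChars

def pvFlush (buf : List Char) (acc : List String) : List String :=
  let p := PySem.Chars.strip buf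
  if p = [] then acc else acc ++ [String.ofList p]

def extract_phrases_alt (text : String) : Option (List String) :=
  if text = "" then none
  else
    let st := text.toList.foldl
      (fun (st : List String × List Char) ch =>
        if pvDelimSet.contains ch then (pvFlush st.2 st.1, []) else (st.1, st.2 ++ [ch]))
      ([], [])
    some (pvFlush st.2 st.1)

-- ===== PRECONDITION & SPEC =====
def Spec_extract_phrases (text : String) (out : Option (List String)) : Prop := out = extract_phrases_alt text
instance (text : String) (out : Option (List String)) : Decidable (Spec_extract_phrases text out) := by unfold Spec_extract_phrases; infer_instance

-- ===== CLAIM (what is proved, stated in full; the proofs are below) =====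
def Claim_equal_extract_phrases : Prop := ∀ (text : String), Dom_extract_phrases text → Spec_extract_phrases text (extract_phrases text)

-- ===== LEMMAS AND PROOFS =====

def pvIsDelim (c : Char) : Bool := pvDelimChars.contains c

-- pieces of a char list split at delimiter characters
def pvSplitP : List Char → List (List Char)
  | [] => [[]]
  | c :: t =>
    if pvIsDelim c then [] :: pvSplitP t
    else match pvSplitP t with
      | [] => [[c]]
      | p :: ps => (c :: p) :: ps

lemma pvSplitP_ne_nil (l : List Char) : pvSplitP l ≠ [] := by
  cases l with
  | nil => simp [pvSplitP]
  | cons c t =>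
    simp only [pvSplitP]
    split
    · simp
    · split <;> simp_all

def pvResultOf (pieces : List (List Char)) : List String :=
  (pieces.map (fun p => String.ofList (PySem.Chars.strip p))).filter (fun tok => tok ≠ "")

-- single-char replace is a map
lemma pv_replace_go_single (o n : Char) :
    ∀ (l acc : List Char) (fuel : Nat), l.length ≤ fuel →
      PySem.Chars.replace.go [o] [n] fuel l acc
        = acc.reverse ++ l.map (fun c => if c = o then n else c) := by
  intro l
  induction l with
  | nil => intro acc fuel _; cases fuel <;> simp [PySem.Chars.replace.go]
  | cons c t ih =>
    intro acc fuel hf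
    cases fuel with
    | zero => simp at hf
    | succ f =>
      simp only [PySem.Chars.replace.go, List.isPrefixOf, List.length_cons] at *
      by_cases h : c = o
      · simp [h, ih _ f (by omega)]
      · simp [h, Ne.symm h, ih _ f (by omega)]

lemma pv_replace_single (o n : Char) (l : List Char) :
    PySem.Chars.replace l [o] [n] = l.map (fun c => if c = o then n else c) := by
  simp [PySem.Chars.replace, pv_replace_go_single o n l [] l.length le_rfl]

-- the replace fold of A is one map
lemma pv_foldl_replace (cs acc : List Char) :
    cs.foldl (fun acc i => if pvDelimChars.contains i then PySem.Chars.replace acc [i] [','] else acc) acc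
      = acc.map (fun c => if pvIsDelim c && cs.contains c then ',' else c) := by
  induction cs generalizing acc with
  | nil => simp
  | cons i t ih =>
    simp only [List.foldl_cons]
    by_cases hi : pvIsDelim i
    · rw [if_pos (by simpa [pvIsDelim] using hi), pv_replace_single, ih, List.map_map]
      apply List.map_congr_left
      intro c _
      by_cases hc : c = i
      · subst hc
        simp only [Function.comp, if_pos rfl, List.contains_cons, BEq.rfl, Bool.true_or,
          hi, Bool.true_and, if_true]
        split <;> rfl
      · simp [Function.comp, hc, List.contains_cons, Ne.symm hc]
    · rw [if_neg (by simpa [pvIsDelim] using hi), ih]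
      apply List.map_congr_left
      intro c _
      by_cases hc : c = i
      · subst hc; simp [hi]
      · simp [List.contains_cons, hc, Ne.symm hc]

-- split at the literal comma (the shape of PySem.Chars.splitOn at sep [','])
def pvSplitC : List Char → List (List Char)
  | [] => [[]]
  | c :: t =>
    if c = ',' then [] :: pvSplitC t
    else match pvSplitC t with
      | [] => [[c]]
      | p :: ps => (c :: p) :: ps

lemma pvSplitC_ne_nil (l : List Char) : pvSplitC l ≠ [] := by
  cases l with
  | nil => simp [pvSplitC]
  | cons c t =>
    simp only [pvSplitC]
    split
    · simp
    · split <;> simp_all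

-- characterise PySem.Chars.splitOn.go at a single-char separator
lemma pv_splitOn_go_comma :
    ∀ (l : List Char) (fuel : Nat) (cur : List Char) (acc : List (List Char)), l.length < fuel →
      PySem.Chars.splitOn.go [','] fuel l cur acc
        = acc.reverse ++ (match pvSplitC l with
            | [] => []
            | p :: ps => (cur.reverse ++ p) :: ps) := by
  intro l
  induction l with
  | nil =>
    intro fuel cur acc hf
    cases fuel with
    | zero => omega
    | succ f => simp [PySem.Chars.splitOn.go, pvSplitC]
  | cons c t ih =>
    intro fuel cur acc hf
    cases fuel with
    | zero => omega
    | succ f =>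
      simp only [List.length_cons] at hf
      by_cases h : c = ','
      · subst h
        rw [show PySem.Chars.splitOn.go [','] (f+1) (',' :: t) cur acc
              = PySem.Chars.splitOn.go [','] f t [] (cur.reverse :: acc) by
            simp [PySem.Chars.splitOn.go, List.isPrefixOf]]
        rw [ih f [] (cur.reverse :: acc) (by omega)]
        rcases hsp : pvSplitC t with _ | ⟨p, ps⟩
        · exact absurd hsp (pvSplitC_ne_nil t)
        · simp [pvSplitC, hsp]
      · rw [show PySem.Chars.splitOn.go [','] (f+1) (c :: t) cur acc
              = PySem.Chars.splitOn.go [','] f t (c :: cur) acc by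
            simp [PySem.Chars.splitOn.go, List.isPrefixOf, Ne.symm h]]
        rw [ih f (c :: cur) acc (by omega)]
        rcases hsp : pvSplitC t with _ | ⟨p, ps⟩
        · exact absurd hsp (pvSplitC_ne_nil t)
        · simp [pvSplitC, hsp, h]

lemma pv_splitOn_comma (l : List Char) :
    PySem.Chars.splitOn l [','] = pvSplitC l := by
  rw [PySem.Chars.splitOn, pv_splitOn_go_comma l (l.length + 1) [] [] (by omega)]
  rcases hsp : pvSplitC l with _ | ⟨p, ps⟩
  · exact absurd hsp (pvSplitC_ne_nil l)
  · simp

-- after the map, splitting at ',' is splitting at delimiters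
lemma pv_splitC_map (cs : List Char) :
    pvSplitC (cs.map (fun c => if pvIsDelim c then ',' else c)) = pvSplitP cs := by
  induction cs with
  | nil => simp [pvSplitC, pvSplitP]
  | cons c t ih =>
    by_cases h : pvIsDelim c
    · simp [pvSplitC, pvSplitP, h, ih]
    · have hc : c ≠ ',' := by
        intro hq; subst hq; exact h (by decide)
      simp only [List.map_cons, if_neg h, pvSplitC, pvSplitP, if_neg hc, ih]

lemma pv_mk_eq_empty_iff (p : List Char) : String.ofList p = "" ↔ p = [] := by
  constructor
  · intro h
    have := congrArg String.toList h
    simpa using this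
  · intro h; subst h; rfl

lemma pv_flush_resultOf (buf : List Char) (acc : List String) :
    pvFlush buf acc = acc ++ pvResultOf [buf] := by
  simp only [pvFlush, pvResultOf, List.map_cons, List.map_nil, List.filter]
  by_cases h : PySem.Chars.strip buf = []
  · simp [h]
  · simp [h, (pv_mk_eq_empty_iff (PySem.Chars.strip buf)).not.mpr h]

lemma pv_resultOf_cons (p : List Char) (ps : List (List Char)) :
    pvResultOf (p :: ps) = pvResultOf [p] ++ pvResultOf ps := by
  simp [pvResultOf, List.filter]
  split <;> simp

def pvStepB (st : List String × List Char) (ch : Char) : List String × List Char :=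
  if pvDelimSet.contains ch then (pvFlush st.2 st.1, []) else (st.1, st.2 ++ [ch])

lemma pv_setContains (ch : Char) : pvDelimSet.contains ch = pvIsDelim ch := by
  simp only [pvDelimSet, pvIsDelim]
  rcases h : pvDelimChars.contains ch
  · simp only [List.contains_eq_mem, decide_eq_false_iff_not] at h
    simpa [PySem.Set.mem_ofList] using h
  · simp only [List.contains_eq_mem, decide_eq_true_eq] at h
    simpa [PySem.Set.mem_ofList] using h

lemma pv_foldB (cs : List Char) :
    ∀ (acc : List String) (buf : List Char),
      (let st := cs.foldl pvStepB (acc, buf); pvFlush st.2 st.1)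
        = acc ++ pvResultOf (match pvSplitP cs with
            | [] => []
            | p :: ps => (buf ++ p) :: ps) := by
  induction cs with
  | nil =>
    intro acc buf
    simpa [pvSplitP] using pv_flush_resultOf buf acc
  | cons c t ih =>
    intro acc buf
    by_cases h : pvIsDelim c
    · simp only [List.foldl_cons, pvStepB, pv_setContains, h, if_pos]
      rw [ih (pvFlush buf acc) []]
      rcases hsp : pvSplitP t with _ | ⟨p, ps⟩
      · exact absurd hsp (pvSplitP_ne_nil t)
      · simp only [pvSplitP, h, if_pos, hsp, List.append_nil]
        rw [pv_flush_resultOf, pv_resultOf_cons buf]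
        rw [pv_resultOf_cons buf (p :: ps)]
        simp only [List.nil_append, List.append_assoc, show pvResultOf [] = [] from rfl,
          List.append_nil]
    · simp only [List.foldl_cons, pvStepB, pv_setContains, h, if_neg, Bool.false_eq_true,
        not_false_iff]
      rw [ih acc (buf ++ [c])]
      rcases hsp : pvSplitP t with _ | ⟨p, ps⟩
      · exact absurd hsp (pvSplitP_ne_nil t)
      · simp [pvSplitP, h, hsp]

-- ===== VERDICT (by name: the statement is the Claim_ definition above) =====
theorem extract_phrases_spec : Claim_equal_extract_phrases := by
  intro text _
  unfold Spec_extract_phrases extract_phrases extract_phrases_alt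
  by_cases h : text = ""
  · simp [h]
  · simp only [h, if_false]
    rw [pv_foldl_replace]
    have hmap : (text.toList.map (fun c => if pvIsDelim c && text.toList.contains c then ',' else c))
        = text.toList.map (fun c => if pvIsDelim c then ',' else c) := by
      apply List.map_congr_left
      intro c hc
      simp [List.contains_eq_mem, hc]
    rw [hmap, pv_splitOn_comma, pv_splitC_map]
    have hb := pv_foldB text.toList [] []
    rw [show (text.toList.foldl (fun st ch =>
          if pvDelimSet.contains ch then (pvFlush st.2 st.1, []) else (st.1, st.2 ++ [ch])) ([], []))
        = text.toList.foldl pvStepB ([], []) from rfl]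
    rw [hb]
    rcases hsp : pvSplitP text.toList with _ | ⟨p, ps⟩
    · exact absurd hsp (pvSplitP_ne_nil text.toList)
    · simp [pvResultOf]
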